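-- pv_equiv track=rewrite | github.com/Shunpoco/leetcode | sort-the-jumbled-numbers/main.py | convert
-- ===== SOURCE A (Python) =====
-- def convert(mapping, nums)-> int:
--     if nums == 0:
--         return mapping[nums]
--     r = 0
--     t = 1
--     while nums > 0:
--         v = nums % 10
--         r += mapping[v] * t
--         nums //= 10
--         t *= 10
--
--     return r
-- ===== SOURCE B (Python) =====
-- def convert(mapping, nums) -> int:
--     if nums < 10:
--         return mapping[nums]
--     return convert(mapping, nums // 10) * 10 + mapping[nums % 10]
-- ===== Notes on version B (the rewrite author's own statement) =====
-- stated objective: simpler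
-- what changed: B replaces A's least-significant-first while-loop with an accumulator and a running power of ten by a direct most-significant-first Horner recursion (convert(nums//10)*10 + mapping[nums%10]).
-- outside the precondition, e.g. on convert([5, 6], -3): A returns 0, B raises IndexError; on convert([5, 6], -1): A returns 0, B returns 6
import Mathlib
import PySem

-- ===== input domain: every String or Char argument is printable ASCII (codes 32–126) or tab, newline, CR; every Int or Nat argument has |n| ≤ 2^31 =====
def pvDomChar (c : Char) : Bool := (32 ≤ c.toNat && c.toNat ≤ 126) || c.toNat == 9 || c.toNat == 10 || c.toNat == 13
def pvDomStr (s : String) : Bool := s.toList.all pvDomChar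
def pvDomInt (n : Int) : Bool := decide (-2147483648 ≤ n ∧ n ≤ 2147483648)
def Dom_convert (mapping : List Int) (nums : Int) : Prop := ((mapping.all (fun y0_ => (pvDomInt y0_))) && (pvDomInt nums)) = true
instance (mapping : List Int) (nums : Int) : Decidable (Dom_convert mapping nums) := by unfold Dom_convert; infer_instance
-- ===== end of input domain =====

-- B computes the same digit-mapped number by a most-significant-first Horner recursion instead of A's least-significant-first accumulation with powers of ten (objective: simpler).
-- ===== PORT A =====
def convertLoopA (mapping : List Int) (nums r t : Int) : Int :=
  if h : nums > 0 then
    convertLoopA mapping (PySem.Int.floordiv nums 10)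
      (r + (PySem.List.pyGet? mapping (PySem.Int.mod nums 10)).getD 0 * t) (t * 10)
  else r
termination_by nums.toNat
decreasing_by
  rw [PySem.Int.floordiv_eq_ediv_of_pos (by norm_num)]
  omega

def convert (mapping : List Int) (nums : Int) : Int :=
  if nums = 0 then (PySem.List.pyGet? mapping nums).getD 0
  else convertLoopA mapping nums 0 1

-- ===== PORT B =====
def convert_alt (mapping : List Int) (nums : Int) : Int :=
  if h : nums < 10 then (PySem.List.pyGet? mapping nums).getD 0
  else convert_alt mapping (PySem.Int.floordiv nums 10) * 10
       + (PySem.List.pyGet? mapping (PySem.Int.mod nums 10)).getD 0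
termination_by nums.toNat
decreasing_by
  rw [PySem.Int.floordiv_eq_ediv_of_pos (by norm_num)]
  omega

-- ===== PRECONDITION & SPEC =====
-- Pre_ excludes negative nums, outside this digit-mapping function's natural domain (A's
-- while-guard accidentally yields 0 there, while B's recursion indexes mapping with a
-- negative value), and mappings too short for some digit of nums, on which A raises IndexError.
def Pre_convert (mapping : List Int) (nums : Int) : Prop :=
  0 ≤ nums ∧ mapping ≠ [] ∧ ∀ d ∈ Nat.digits 10 nums.toNat, d < mapping.length
instance (mapping : List Int) (nums : Int) : Decidable (Pre_convert mapping nums) := by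
  unfold Pre_convert; infer_instance
def pvWitness_convert : List Int × Int := ([8, 9, 4, 0, 1, 2, 6, 7, 3, 5], 338)

def Spec_convert (mapping : List Int) (nums : Int) (out : Int) : Prop := out = convert_alt mapping nums
instance (mapping : List Int) (nums : Int) (out : Int) : Decidable (Spec_convert mapping nums out) := by unfold Spec_convert; infer_instance

-- ===== CLAIM (what is proved, stated in full; the proofs are below) =====
def Claim_equal_convert : Prop := ∀ (mapping : List Int) (nums : Int), Dom_convert mapping nums → Pre_convert mapping nums → Spec_convert mapping nums (convert mapping nums)

-- ===== LEMMAS AND PROOFS =====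
theorem convert_alt_of_lt_ten (mapping : List Int) (n : Int) (h : n < 10) :
    convert_alt mapping n = (PySem.List.pyGet? mapping n).getD 0 := by
  rw [convert_alt]; simp [h]

theorem convert_alt_of_ge_ten (mapping : List Int) (n : Int) (h : ¬ n < 10) :
    convert_alt mapping n = convert_alt mapping (PySem.Int.floordiv n 10) * 10
      + (PySem.List.pyGet? mapping (PySem.Int.mod n 10)).getD 0 := by
  rw [convert_alt]; simp [h]

theorem convertLoopA_eq (mapping : List Int) :
    ∀ (k : Nat) (n r t : Int), n.toNat ≤ k → 0 < n →
      convertLoopA mapping n r t = r + t * convert_alt mapping n := by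
  intro k
  induction k with
  | zero => intro n r t hk hn; omega
  | succ k ih =>
    intro n r t hk hn
    rw [convertLoopA]
    simp only [hn, dite_true]
    rw [PySem.Int.floordiv_eq_ediv_of_pos (by norm_num),
        PySem.Int.mod_eq_emod_of_pos (by norm_num)]
    by_cases h10 : n < 10
    · have h0 : n / 10 = 0 := by omega
      have hm : n % 10 = n := by omega
      rw [h0, hm, convertLoopA]
      simp only [show ¬ ((0:Int) > 0) by omega, dite_false]
      rw [convert_alt_of_lt_ten mapping n h10]
      ring
    · have hpos : 0 < n / 10 := by omega
      rw [ih (n / 10) _ _ (by omega) hpos]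
      rw [convert_alt_of_ge_ten mapping n h10,
          PySem.Int.floordiv_eq_ediv_of_pos (by norm_num),
          PySem.Int.mod_eq_emod_of_pos (by norm_num)]
      ring

-- ===== VERDICT (by name: the statement is the Claim_ definition above) =====
theorem convert_spec : Claim_equal_convert := by
  intro mapping nums _ hpre
  unfold Spec_convert convert
  by_cases h0 : nums = 0
  · subst h0
    rw [convert_alt_of_lt_ten mapping 0 (by norm_num)]
    simp
  · have hpos : 0 < nums := by rcases hpre with ⟨h, _⟩; omega
    rw [if_neg h0, convertLoopA_eq mapping nums.toNat nums 0 1 le_rfl hpos]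
    ring
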